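-- pv_equiv track=rewrite | github.com/Rct567/wf_lists_lm_childrenstories | lib/text_processing.py | has_long_alliteration
-- ===== SOURCE A (Python) =====
-- from typing import Callable, Counter, NewType, Optional, Sequence, Union
--
-- WordToken = NewType('WordToken', str)
--
-- def has_long_alliteration(words: list[WordToken], n: int) -> bool:
--
--     first_letters = [word[0] for word in words if word]
--
--     current_letter = None
--     current_count = 0
--
--     for letter in first_letters:
--         if letter == current_letter:
--             current_count += 1
--         else:
--             current_letter = letter
--             current_count = 1
--         if current_count >= n:
--             return True
--
--     return False
-- ===== SOURCE B (Python) =====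
-- def has_long_alliteration(words, n):
--     letters = [word[0] for word in words if word]
--     while letters:
--         c = letters[0]
--         i = 1
--         while i < len(letters) and letters[i] == c:
--             i += 1
--         if i >= n:
--             return True
--         letters = letters[i:]
--     return False
-- ===== Notes on version B (the rewrite author's own statement) =====
-- stated objective: alternative
-- what changed: Replaces A's per-letter current_letter/current_count state machine with a two-pointer span scan: each run of equal first letters is measured as a whole (inner while) and then skipped, instead of incrementing a counter letter by letter.
import Mathlib
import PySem

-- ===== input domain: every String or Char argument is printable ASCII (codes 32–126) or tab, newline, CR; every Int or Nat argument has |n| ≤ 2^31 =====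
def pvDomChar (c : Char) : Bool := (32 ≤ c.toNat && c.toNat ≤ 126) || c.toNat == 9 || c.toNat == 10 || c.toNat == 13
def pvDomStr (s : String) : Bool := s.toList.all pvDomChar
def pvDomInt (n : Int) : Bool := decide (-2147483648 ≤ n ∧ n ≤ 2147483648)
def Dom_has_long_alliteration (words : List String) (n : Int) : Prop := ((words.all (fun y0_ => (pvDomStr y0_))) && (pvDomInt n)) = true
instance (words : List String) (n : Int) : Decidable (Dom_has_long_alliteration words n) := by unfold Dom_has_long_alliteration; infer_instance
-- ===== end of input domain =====

-- B replaces A's per-letter counter state machine with a two-pointer run/span scan (same cost; objective: alternative).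

-- ===== PORT A =====
-- [word[0] for word in words if word]  (shared by both sources verbatim)
def pvFirstLetters (words : List String) : List Char :=
  words.filterMap (fun w => w.toList.head?)

-- A's loop: state (current_letter, current_count), updated per letter, early return on count ≥ n
def pvALoop (n : Int) (cur : Option Char) (cnt : Int) : List Char → Bool
  | [] => false
  | l :: rest =>
    let cur' := if some l = cur then cur else some l
    let cnt' := if some l = cur then cnt + 1 else 1
    if n ≤ cnt' then true else pvALoop n cur' cnt' rest

def has_long_alliteration (words : List String) (n : Int) : Bool :=
  pvALoop n none 0 (pvFirstLetters words)

-- ===== PORT B =====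
-- B's loop: measure the whole leading run (inner while = takeWhile), test it, skip past it
def pvBLoop (n : Int) : List Char → Bool
  | [] => false
  | c :: rest =>
    if n ≤ 1 + ((rest.takeWhile (· = c)).length : Int) then true
    else pvBLoop n (rest.dropWhile (· = c))
termination_by l => l.length
decreasing_by
  simp only [List.length_cons]
  exact Nat.lt_succ_of_le (List.length_dropWhile_le _ _)

def has_long_alliteration_alt (words : List String) (n : Int) : Bool :=
  pvBLoop n (pvFirstLetters words)

-- ===== PRECONDITION & SPEC =====
def Spec_has_long_alliteration (words : List String) (n : Int) (out : Bool) : Prop := out = has_long_alliteration_alt words n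
instance (words : List String) (n : Int) (out : Bool) : Decidable (Spec_has_long_alliteration words n out) := by unfold Spec_has_long_alliteration; infer_instance

-- ===== CLAIM (what is proved, stated in full; the proofs are below) =====
def Claim_equal_has_long_alliteration : Prop := ∀ (words : List String) (n : Int), Dom_has_long_alliteration words n → Spec_has_long_alliteration words n (has_long_alliteration words n)

-- ===== LEMMAS AND PROOFS =====

theorem pvALoop_span (n : Int) (rest : List Char) : ∀ (c : Char) (cnt : Int), cnt < n →
    pvALoop n (some c) cnt rest =
      (decide (n ≤ cnt + ((rest.takeWhile (· = c)).length : Int)) || pvBLoop n (rest.dropWhile (· = c))) := by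
  induction rest with
  | nil =>
    intro c cnt hlt
    simp [pvALoop, pvBLoop]
    omega
  | cons l rest ih =>
    intro c cnt hlt
    by_cases hl : l = c
    · subst hl
      simp only [pvALoop, List.takeWhile_cons, List.dropWhile_cons, decide_true, if_true,
        List.length_cons]
      by_cases h1 : n ≤ cnt + 1
      · simp only [if_pos h1]
        have h2 : n ≤ cnt + (((rest.takeWhile (· = l)).length : Int) + 1) := by
          have := Int.natCast_nonneg ((rest.takeWhile (· = l)).length)
          omega
        push_cast
        simp [h2]
      · simp only [if_neg h1]
        rw [ih l (cnt + 1) (by omega)]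
        congr 1
        rw [decide_eq_decide]
        push_cast
        omega
    · have hsl : ¬ (some l = some c) := by simpa using hl
      simp only [pvALoop, if_neg hsl]
      have htw : (l :: rest).takeWhile (· = c) = [] := by
        simp [hl]
      have hdw : (l :: rest).dropWhile (· = c) = l :: rest := by
        simp [hl]
      rw [htw, hdw]
      by_cases h1 : n ≤ 1
      · have htw2 : n ≤ 1 + ((rest.takeWhile (· = l)).length : Int) := by
          have := Int.natCast_nonneg ((rest.takeWhile (· = l)).length)
          omega
        simp [pvBLoop, h1, htw2]
      · simp only [if_neg h1]
        rw [ih l 1 (by omega)]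
        simp only [pvBLoop, List.length_nil, Int.natCast_zero, Int.add_zero]
        by_cases h2 : n ≤ 1 + ((rest.takeWhile (· = l)).length : Int)
        · simp [h2]
        · simp only [if_neg h2]
          have h3 : ¬ (n ≤ cnt) := by omega
          simp [h2, h3]

theorem pvLoop_eq (n : Int) (letters : List Char) : pvALoop n none 0 letters = pvBLoop n letters := by
  cases letters with
  | nil => simp [pvALoop, pvBLoop]
  | cons l rest =>
    have hsl : ¬ (some l = (none : Option Char)) := by simp
    simp only [pvALoop, if_neg hsl]
    by_cases h1 : n ≤ 1
    · have : n ≤ 1 + ((rest.takeWhile (· = l)).length : Int) := by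
        have : (0:Int) ≤ ((rest.takeWhile (· = l)).length : Int) := Int.natCast_nonneg _
        omega
      simp [pvBLoop, h1, this]
    · rw [if_neg (by omega : ¬ n ≤ (1:Int)), pvALoop_span n rest l 1 (by omega)]
      simp only [pvBLoop]
      by_cases h2 : n ≤ 1 + ((rest.takeWhile (· = l)).length : Int)
      · simp [h2]
      · simp only [if_neg h2]
        have : ¬ (n ≤ 1 + ((rest.takeWhile (· = l)).length : Int)) := h2
        simp
        omega

-- ===== VERDICT (by name: the statement is the Claim_ definition above) =====
theorem has_long_alliteration_spec : Claim_equal_has_long_alliteration := by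
  intro words n _
  unfold Spec_has_long_alliteration has_long_alliteration has_long_alliteration_alt
  exact pvLoop_eq n (pvFirstLetters words)
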